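-- pv_equiv track=rewrite | github.com/HugoTLR/Algorithm | Sorting/algos.py | build_status
-- ===== SOURCE A (Python) =====
-- def build_status(i,l):
--   ll = []
--   for j in range(l):
--     if j <= i :
--       ll.append(1)
--     elif j > i + 1:
--       ll.append(0)
--     else:
--       ll.append(2)
--   return ll
-- ===== SOURCE B (Python) =====
-- def build_status(i, l):
--     ones = max(0, min(i + 1, l))
--     two = 1 if 0 <= i + 1 < l else 0
--     zeros = l - ones - two
--     return [1] * ones + [2] * two + [0] * zeros
-- ===== Notes on version B (the rewrite author's own statement) =====
-- stated objective: simpler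
-- what changed: Replaces the per-element loop with a closed-form computation of the three contiguous run lengths (ones/two/zeros) and builds the list by replication.
import Mathlib
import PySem

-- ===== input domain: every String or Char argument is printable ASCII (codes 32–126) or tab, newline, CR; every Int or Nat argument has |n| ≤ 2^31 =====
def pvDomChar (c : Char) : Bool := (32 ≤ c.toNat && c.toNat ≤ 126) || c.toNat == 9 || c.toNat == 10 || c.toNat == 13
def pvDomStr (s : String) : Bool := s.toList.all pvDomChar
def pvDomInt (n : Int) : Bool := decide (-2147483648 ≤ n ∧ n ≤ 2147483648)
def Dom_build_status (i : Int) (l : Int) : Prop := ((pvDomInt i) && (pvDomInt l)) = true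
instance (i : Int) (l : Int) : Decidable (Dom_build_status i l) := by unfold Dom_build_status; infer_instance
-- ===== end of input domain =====

-- B computes the three run lengths in closed form instead of looping with branches (objective: simpler).
-- ===== PORT A =====
def build_status (i : Int) (l : Int) : List Int :=
  (PySem.List.pyRange 0 l 1).foldl
    (fun ll j => if j ≤ i then ll ++ [1] else if j > i + 1 then ll ++ [0] else ll ++ [2]) []

-- ===== PORT B =====
def build_status_alt (i : Int) (l : Int) : List Int :=
  let ones := max 0 (min (i + 1) l)
  let two : Int := if 0 ≤ i + 1 ∧ i + 1 < l then 1 else 0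
  let zeros := l - ones - two
  List.replicate ones.toNat 1 ++ List.replicate two.toNat 2 ++ List.replicate zeros.toNat 0

-- ===== PRECONDITION & SPEC =====
def Spec_build_status (i : Int) (l : Int) (out : List Int) : Prop := out = build_status_alt i l
instance (i : Int) (l : Int) (out : List Int) : Decidable (Spec_build_status i l out) := by unfold Spec_build_status; infer_instance

-- ===== CLAIM (what is proved, stated in full; the proofs are below) =====
def Claim_equal_build_status : Prop := ∀ (i : Int) (l : Int), Dom_build_status i l → Spec_build_status i l (build_status i l)

-- ===== LEMMAS AND PROOFS =====

lemma build_status_step (i : Int) (n : Nat) :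
    build_status i ((n : Int) + 1) = build_status i (n : Int) ++
      (if (n : Int) ≤ i then [1] else if (n : Int) > i + 1 then [0] else [2]) := by
  unfold build_status
  rw [PySem.List.pyRange_one_succ_right (by positivity), List.foldl_append]
  simp only [List.foldl_cons, List.foldl_nil]
  split_ifs <;> simp

lemma build_status_eq_nat (i : Int) (n : Nat) : build_status i (n : Int) = build_status_alt i (n : Int) := by
  induction n with
  | zero =>
    have ht : ¬ (0 ≤ i + 1 ∧ i + 1 < (0:Int)) := by omega
    simp [build_status, build_status_alt, ht,
      PySem.List.pyRange_one_eq_nil (by omega : (0:Int) ≤ 0)]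
  | succ n ih =>
    push_cast
    rw [build_status_step, ih]
    unfold build_status_alt
    rcases (show (n : Int) ≤ i ∨ i < (n : Int) by omega) with h | h
    · have h1 : max 0 (min (i+1) ((n:Int)+1)) = (n:Int)+1 := by omega
      have h2 : max 0 (min (i+1) (n:Int)) = (n:Int) := by omega
      have t1 : ¬ (0 ≤ i + 1 ∧ i + 1 < (n:Int) + 1) := by omega
      have t2 : ¬ (0 ≤ i + 1 ∧ i + 1 < (n:Int)) := by omega
      simp only [h1, h2, if_pos h, if_neg t1, if_neg t2]
      have : ((n:Int)+1).toNat = (n:Int).toNat + 1 := by omega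
      simp [this, List.replicate_succ']
    · rcases (show i + 1 = (n:Int) ∨ i + 1 < (n:Int) by omega) with he | hl
      · -- n = i + 1 : element 2
        have h1 : max 0 (min (i+1) ((n:Int)+1)) = i + 1 := by omega
        have h2 : max 0 (min (i+1) (n:Int)) = i + 1 := by omega
        have t1 : (0 ≤ i + 1 ∧ i + 1 < (n:Int) + 1) := by omega
        have t2 : ¬ (0 ≤ i + 1 ∧ i + 1 < (n:Int)) := by omega
        have hn : ¬ ((n:Int) ≤ i) := by omega
        have hg : ¬ ((n:Int) > i + 1) := by omega
        simp only [h1, h2, if_pos t1, if_neg t2, if_neg hn, if_neg hg]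
        have z2 : ((n:Int) - (i+1)).toNat = 0 := by omega
        have z3 : ((n:Int) - i).toNat = 1 := by omega
        simp [z2, z3]
      · -- n > i + 1 : element 0
        have h1 : max 0 (min (i+1) ((n:Int)+1)) = max 0 (i+1) := by omega
        have h2 : max 0 (min (i+1) (n:Int)) = max 0 (i+1) := by omega
        have teq : (0 ≤ i + 1 ∧ i + 1 < (n:Int) + 1) ↔ (0 ≤ i + 1 ∧ i + 1 < (n:Int)) := by omega
        have hn : ¬ ((n:Int) ≤ i) := by omega
        have hg : ((n:Int) > i + 1) := hl
        simp only [h1, h2, teq, if_neg hn, if_pos hg]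
        by_cases h0 : (0 ≤ i + 1 ∧ i + 1 < (n:Int))
        · simp only [if_pos h0]
          have : ((n:Int) + 1 - max 0 (i+1) - 1).toNat = ((n:Int) - max 0 (i+1) - 1).toNat + 1 := by omega
          simp [this, List.replicate_succ']
        · simp only [if_neg h0]
          have w : ((n:Int) + 1 - max 0 (i+1)).toNat = ((n:Int) - max 0 (i+1)).toNat + 1 := by omega
          simp [w, List.replicate_succ']

-- ===== VERDICT (by name: the statement is the Claim_ definition above) =====
theorem build_status_spec : Claim_equal_build_status := by
  intro i l _
  unfold Spec_build_status
  rcases (show l ≤ 0 ∨ 0 < l by omega) with h | h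
  · have ht : ¬ (0 ≤ i + 1 ∧ i + 1 < l) := by omega
    have h1 : (max 0 (min (i+1) l)).toNat = 0 := by omega
    simp [build_status, build_status_alt, ht, h1,
      PySem.List.pyRange_one_eq_nil (by omega : l ≤ 0)]
    omega
  · have : l = ((l.toNat : Int)) := by omega
    rw [this]
    exact build_status_eq_nat i l.toNat
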